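-- pv_equiv track=rewrite | github.com/innocent123cent/AI-AND-ANALYTICS | dictionary.py | word_indices
-- ===== SOURCE A (Python) =====
-- def word_indices(text):
--     words = text.split()  # Split the text into words
--     result = {}
--
--     for index, word in enumerate(words):
--         if word not in result:
--             result[word] = []  # Initialize a list for the word
--         result[word].append(index)  # Append the index of the word
--
--     return result
-- ===== SOURCE B (Python) =====
-- def word_indices(text):
--     words = text.split()
--     return {w: [i for i, x in enumerate(words) if x == w]
--             for w in dict.fromkeys(words)}
-- ===== Notes on version B (the rewrite author's own statement) =====
-- stated objective: alternative
-- what changed: Replaces A's single-pass dict-grouping loop (conditional init + append) by a dict comprehension over the deduplicated word list, rebuilding each word's index list with a fresh scan of the enumerated words.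
import Mathlib
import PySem

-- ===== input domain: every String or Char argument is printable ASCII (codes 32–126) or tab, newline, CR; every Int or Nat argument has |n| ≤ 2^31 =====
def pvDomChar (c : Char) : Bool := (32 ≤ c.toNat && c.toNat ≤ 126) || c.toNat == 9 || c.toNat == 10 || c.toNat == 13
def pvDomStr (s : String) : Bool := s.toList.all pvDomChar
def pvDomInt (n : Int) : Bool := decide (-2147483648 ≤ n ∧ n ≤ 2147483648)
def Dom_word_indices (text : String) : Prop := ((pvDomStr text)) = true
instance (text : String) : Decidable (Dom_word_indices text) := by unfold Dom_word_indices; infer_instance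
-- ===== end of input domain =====

-- B replaces A's single-pass dict-grouping loop by a comprehension over the deduplicated
-- word list with a per-word rescan of the enumerated words (alternative decomposition).


-- ===== PORT A =====
-- words = text.split(); result = {}; for index, word in enumerate(words):
--   if word not in result: result[word] = []
--   result[word].append(index)
-- return result
def word_indices (text : String) : List (String × List Int) :=
  let words := PySem.Str.split₀ text
  let result := (PySem.List.enumerate words).foldl
    (fun d p =>
      let d1 := if d.contains p.2 then d else d.insert p.2 ([] : List Int)
      d1.modify p.2 [] (fun l => l ++ [p.1]))
    PySem.Dict.empty
  result.items

-- ===== PORT B =====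
-- {w: [i for i, x in enumerate(words) if x == w] for w in dict.fromkeys(words)}
def word_indices_alt (text : String) : List (String × List Int) :=
  let words := PySem.Str.split₀ text
  (PySem.List.dedup words).map
    (fun w => (w, ((PySem.List.enumerate words).filter (fun p => p.2 == w)).map (·.1)))

-- ===== PRECONDITION & SPEC =====
def Spec_word_indices (text : String) (out : List (String × List Int)) : Prop := out = word_indices_alt text
instance (text : String) (out : List (String × List Int)) : Decidable (Spec_word_indices text out) := by unfold Spec_word_indices; infer_instance

-- ===== CLAIM (what is proved, stated in full; the proofs are below) =====
def Claim_equal_word_indices : Prop := ∀ (text : String), Dom_word_indices text → Spec_word_indices text (word_indices text)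

-- ===== LEMMAS AND PROOFS =====

-- The conditional initialisation followed by the append-modify collapses to a plain modify.
theorem wi_step (d : PySem.Dict String (List Int)) (w : String) (f : List Int → List Int) :
    (if d.contains w then d else d.insert w ([] : List Int)).modify w [] f
      = d.modify w [] f := by
  by_cases h : d.contains w = true
  · simp [h]
  · simp only [h, Bool.false_eq_true, if_false]
    show (d.insert w []).insert w (f ((d.insert w []).getD w [])) = d.insert w (f (d.getD w []))
    rw [PySem.Dict.getD_insert_self, PySem.Dict.insert_insert_self,
        PySem.Dict.getD_of_not_contains _ _ (by simpa using h)]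

-- A's loop is the canonical grouping fold over (word, index) pairs.
theorem wi_fold (words : List String) :
    (PySem.List.enumerate words).foldl
      (fun d p =>
        (if d.contains p.2 then d else d.insert p.2 ([] : List Int)).modify p.2 []
          (fun l => l ++ [p.1]))
      PySem.Dict.empty
    = ((PySem.List.enumerate words).map (fun p => (p.2, p.1))).foldl
        (fun d p => d.modify p.1 [] (fun x => x ++ [p.2])) PySem.Dict.empty := by
  rw [List.foldl_map]
  exact PySem.List.foldl_congr_mem _ _ _ _ (fun d p _ => wi_step d p.2 _)

theorem word_indices_eq (text : String) : word_indices text = word_indices_alt text := by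
  unfold word_indices word_indices_alt
  simp only [wi_fold]
  generalize PySem.Str.split₀ text = words
  have hnodup := PySem.Dict.nodup_keys_foldl_modify_key
    ((PySem.List.enumerate words).map (fun p => (p.2, p.1))) (fun p => p.1) []
    (fun _ p => fun x => x ++ [p.2]) PySem.Dict.empty (by simp [PySem.Dict.keys_empty])
  rw [PySem.Dict.items_eq_map_keys _ hnodup []]
  have hkeys := PySem.Dict.keys_foldl_modify_key
    ((PySem.List.enumerate words).map (fun p => (p.2, p.1))) (fun p => p.1) []
    (fun _ p => fun x => x ++ [p.2]) PySem.Dict.empty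
  rw [hkeys, PySem.Dict.keys_empty, List.map_map,
      show ((fun p : String × Int => p.1) ∘ fun p : Int × String => (p.2, p.1))
        = (fun p : Int × String => p.2) from rfl,
      PySem.List.map_snd_enumerate words 0,
      show PySem.Set.update [] words = PySem.List.dedup words from
        (PySem.List.dedup_eq_ofList words).symm]
  apply List.map_congr_left
  intro w _
  rw [PySem.Dict.getD_foldl_modify_append, PySem.Dict.getD_empty, List.nil_append,
      List.filter_map, List.map_map]
  rfl

-- ===== VERDICT (by name: the statement is the Claim_ definition above) =====
theorem word_indices_spec : Claim_equal_word_indices := by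
  intro text _
  exact word_indices_eq text
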